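-- pv_equiv track=rewrite | github.com/ThanhVu90/nhan-dien-bien-so-xe | utils/paddleocr_processor.py | _smart_character_replacement
-- ===== SOURCE A (Python) =====
-- def _smart_character_replacement(text: str, corrections: dict) -> str:
--     """
--     Thay thế ký tự thông minh dựa trên vị trí trong biển số
--
--     Quy tắc biển số Việt Nam:
--     - 2 ký tự đầu: Số (mã tỉnh) - VD: 29, 30, 51
--     - Ký tự thứ 3: Chữ cái (loại xe) - VD: A, B, C, D, E, F, G, H, K, L
--     - Các ký tự còn lại: Số (có thể có dấu - và .)
--
--     Args:
--         text: Text gốc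
--         corrections: Dictionary các ký tự cần sửa
--
--     Returns:
--         Text đã sửa
--     """
--     if len(text) < 3:
--         return text
--
--     result = ""
--
--     for i, char in enumerate(text):
--         # Bỏ qua ký tự đặc biệt - và .
--         if char in ['-', '.']:
--             result += char
--             continue
--
--         # Đếm số ký tự alphanumeric đã thêm (không tính - và .)
--         alphanumeric_pos = len([c for c in result if c.isalnum()])
--
--         # Vị trí 0-1: Phải là số (mã tỉnh)
--         if alphanumeric_pos < 2:
--             if char.isalpha() and char in corrections:
--                 result += corrections[char]
--             elif char.isdigit():
--                 result += char
--             elif char.isalpha():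
--                 # Cố gắng convert chữ sang số
--                 if char in corrections:
--                     result += corrections[char]
--                 else:
--                     result += char  # Giữ nguyên nếu không biết
--             else:
--                 result += char
--
--         # Vị trí 2: Phải là chữ cái (loại xe)
--         elif alphanumeric_pos == 2:
--             if char.isdigit():
--                 # Nếu là số, cố convert sang chữ gần giống
--                 digit_to_letter = {
--                     '0': 'O', '1': 'I', '3': 'B', '5': 'S',
--                     '6': 'G', '8': 'B'
--                 }
--                 if char in digit_to_letter:
--                     result += digit_to_letter[char]
--                 else:
--                     result += char
--             elif char.isalpha():
--                 # Đảm bảo không phải I, O, Q, W (không dùng trong biển số VN)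
--                 invalid_letters = {'I': 'L', 'O': 'D', 'Q': 'D', 'W': 'V'}
--                 result += invalid_letters.get(char, char)
--             else:
--                 result += char
--
--         # Vị trí 3+: Phải là số
--         else:
--             if char.isalpha() and char in corrections:
--                 result += corrections[char]
--             elif char.isdigit():
--                 result += char
--             elif char.isalpha():
--                 # Convert chữ sang số
--                 if char in corrections:
--                     result += corrections[char]
--                 else:
--                     # Các chữ không có trong corrections
--                     letter_to_digit = {
--                         'A': '4', 'C': '0', 'D': '0', 'E': '3',
--                         'F': '7', 'H': '4', 'J': '1', 'K': '1',
--                         'M': '11', 'N': '1', 'P': '9', 'R': '8',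
--                         'T': '7', 'U': '0', 'V': '5', 'X': '8',
--                         'Y': '7'
--                     }
--                     result += letter_to_digit.get(char, char)
--             else:
--                 result += char
--
--     return result
-- ===== SOURCE B (Python) =====
-- def _smart_character_replacement(text: str, corrections: dict) -> str:
--     """Phase-split rewrite: consume the province prefix and the series letter with
--     two small loops, then map the whole remaining plate number without any counter."""
--     if len(text) < 3:
--         return text
--
--     D2L = {'0': 'O', '1': 'I', '3': 'B', '5': 'S', '6': 'G', '8': 'B'}
--     BAD = {'I': 'L', 'O': 'D', 'Q': 'D', 'W': 'V'}
--     L2D = {'A': '4', 'C': '0', 'D': '0', 'E': '3', 'F': '7', 'H': '4',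
--            'J': '1', 'K': '1', 'M': '11', 'N': '1', 'P': '9', 'R': '8',
--            'T': '7', 'U': '0', 'V': '5', 'X': '8', 'Y': '7'}
--
--     out = []
--     n = len(text)
--     i = 0
--     count = 0
--
--     # phase 1: the province code (until two alphanumerics have been emitted)
--     while i < n and count < 2:
--         ch = text[i]
--         i += 1
--         if ch == '-' or ch == '.':
--             out.append(ch)
--             continue
--         piece = corrections[ch] if (ch.isalpha() and ch in corrections) else ch
--         out.append(piece)
--         count += sum(c.isalnum() for c in piece)
--
--     # phase 2: the series letter (the third alphanumeric)
--     while i < n and count == 2: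
--         ch = text[i]
--         i += 1
--         if ch == '-' or ch == '.':
--             out.append(ch)
--             continue
--         if ch.isdigit():
--             piece = D2L.get(ch, ch)
--         elif ch.isalpha():
--             piece = BAD.get(ch, ch)
--         else:
--             piece = ch
--         out.append(piece)
--         count += sum(c.isalnum() for c in piece)
--
--     # phase 3: the plate number — the category is now fixed, no counter needed
--     out.append(''.join(
--         ch if ch in '-.' or not ch.isalpha()
--         else corrections.get(ch, L2D.get(ch, ch))
--         for ch in text[i:]))
--     return ''.join(out)
-- ===== Notes on version B (the rewrite author's own statement) =====
-- stated objective: faster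
-- what changed: B splits the work into three phases -- two short loops that consume the province code and the series letter with an incremental count, then a counterless single map over the entire remaining tail -- instead of A's one loop that rescans the whole result string at every character to recompute the alphanumeric position.
import Mathlib
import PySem

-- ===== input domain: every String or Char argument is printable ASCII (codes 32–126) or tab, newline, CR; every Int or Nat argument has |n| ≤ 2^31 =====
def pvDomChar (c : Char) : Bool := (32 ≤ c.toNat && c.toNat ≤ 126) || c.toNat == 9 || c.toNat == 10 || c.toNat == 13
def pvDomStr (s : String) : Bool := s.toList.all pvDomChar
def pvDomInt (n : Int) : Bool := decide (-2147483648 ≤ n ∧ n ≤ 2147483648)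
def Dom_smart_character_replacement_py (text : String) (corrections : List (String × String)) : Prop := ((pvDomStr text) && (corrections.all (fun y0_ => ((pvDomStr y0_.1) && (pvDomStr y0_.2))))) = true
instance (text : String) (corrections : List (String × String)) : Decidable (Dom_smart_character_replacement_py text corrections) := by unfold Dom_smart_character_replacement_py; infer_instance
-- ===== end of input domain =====

-- B splits A's single counting loop (which rescans the result string at every character)
-- into three phases: two short counting loops for the province code and the series letter,
-- then one counterless map over the whole remaining tail: O(n) vs A's O(n^2).

-- corrections lookup for a 1-char key: 'char in corrections' / 'corrections[char]' (first match)
def pvLook (corrections : List (String × String)) (ch : Char) : Option String :=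
  (corrections.find? (fun p => p.1 == String.ofList [ch])).map (·.2)

-- digit_to_letter dict literal
def pvDigitToLetter (c : Char) : Option Char :=
  match c with
  | '0' => some 'O' | '1' => some 'I' | '3' => some 'B' | '5' => some 'S'
  | '6' => some 'G' | '8' => some 'B' | _ => none

-- invalid_letters dict literal
def pvInvalidLetter (c : Char) : Option Char :=
  match c with
  | 'I' => some 'L' | 'O' => some 'D' | 'Q' => some 'D' | 'W' => some 'V' | _ => none

-- letter_to_digit dict literal (values are strings; 'M' maps to "11")
def pvLetterToDigit (c : Char) : Option (List Char) :=
  match c with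
  | 'A' => some ['4'] | 'C' => some ['0'] | 'D' => some ['0'] | 'E' => some ['3']
  | 'F' => some ['7'] | 'H' => some ['4'] | 'J' => some ['1'] | 'K' => some ['1']
  | 'M' => some ['1','1'] | 'N' => some ['1'] | 'P' => some ['9'] | 'R' => some ['8']
  | 'T' => some ['7'] | 'U' => some ['0'] | 'V' => some ['5'] | 'X' => some ['8']
  | 'Y' => some ['7'] | _ => none

-- ===== PORT A =====
-- one iteration of A's loop: result += …, with alphanumeric_pos recomputed by scanning result
def pvAStep (corrections : List (String × String)) (result : List Char) (ch : Char) : List Char :=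
  if ch = '-' ∨ ch = '.' then result ++ [ch]
  else
    let pos := (result.filter (fun c => PySem.Chars.isalnum c)).length
    if pos < 2 then
      if PySem.Chars.isalpha ch && (pvLook corrections ch).isSome then
        result ++ ((pvLook corrections ch).getD "").toList
      else if PySem.Chars.isdigit ch then result ++ [ch]
      else if PySem.Chars.isalpha ch then
        (if (pvLook corrections ch).isSome then result ++ ((pvLook corrections ch).getD "").toList
         else result ++ [ch])
      else result ++ [ch]
    else if pos = 2 then
      if PySem.Chars.isdigit ch then
        match pvDigitToLetter ch with
        | some l => result ++ [l]
        | none => result ++ [ch]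
      else if PySem.Chars.isalpha ch then result ++ [(pvInvalidLetter ch).getD ch]
      else result ++ [ch]
    else
      if PySem.Chars.isalpha ch && (pvLook corrections ch).isSome then
        result ++ ((pvLook corrections ch).getD "").toList
      else if PySem.Chars.isdigit ch then result ++ [ch]
      else if PySem.Chars.isalpha ch then
        (if (pvLook corrections ch).isSome then result ++ ((pvLook corrections ch).getD "").toList
         else result ++ ((pvLetterToDigit ch).getD [ch]))
      else result ++ [ch]

def smart_character_replacement_py (text : String) (corrections : List (String × String)) : String :=
  if PySem.Str.len text < 3 then text
  else String.ofList (text.toList.foldl (pvAStep corrections) [])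

-- ===== PORT B =====
-- the alphanumeric count sum(c.isalnum() for c in piece)
def pvCnt (l : List Char) : Nat := (l.filter (fun c => PySem.Chars.isalnum c)).length

-- piece computed by Source B's phase-1 body
def pvRule1 (corrections : List (String × String)) (ch : Char) : List Char :=
  if PySem.Chars.isalpha ch && (pvLook corrections ch).isSome then
    ((pvLook corrections ch).getD "").toList
  else [ch]

-- piece computed by Source B's phase-2 body
def pvRule2 (ch : Char) : List Char :=
  if PySem.Chars.isdigit ch then [(pvDigitToLetter ch).getD ch]
  else if PySem.Chars.isalpha ch then [(pvInvalidLetter ch).getD ch]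
  else [ch]

-- the per-character mapping of Source B's phase-3 comprehension
def pvRule3 (corrections : List (String × String)) (ch : Char) : List Char :=
  if ch = '-' ∨ ch = '.' then [ch]
  else if PySem.Chars.isalpha ch then
    match pvLook corrections ch with
    | some v => v.toList
    | none => (pvLetterToDigit ch).getD [ch]
  else [ch]

-- Source B's first while loop: returns (out, count, unconsumed tail)
def pvPhase1 (corrections : List (String × String)) :
    List Char → List Char → Nat → List Char × Nat × List Char
  | [], out, count => (out, count, [])
  | ch :: rest, out, count =>
    if count < 2 then
      if ch = '-' ∨ ch = '.' then pvPhase1 corrections rest (out ++ [ch]) count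
      else
        let p := pvRule1 corrections ch
        pvPhase1 corrections rest (out ++ p) (count + pvCnt p)
    else (out, count, ch :: rest)

-- Source B's second while loop
def pvPhase2 (corrections : List (String × String)) :
    List Char → List Char → Nat → List Char × Nat × List Char
  | [], out, count => (out, count, [])
  | ch :: rest, out, count =>
    if count = 2 then
      if ch = '-' ∨ ch = '.' then pvPhase2 corrections rest (out ++ [ch]) count
      else
        let p := pvRule2 ch
        pvPhase2 corrections rest (out ++ p) (count + pvCnt p)
    else (out, count, ch :: rest)

def smart_character_replacement_py_alt (text : String) (corrections : List (String × String)) : String :=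
  if PySem.Str.len text < 3 then text
  else
    let r1 := pvPhase1 corrections text.toList [] 0
    let r2 := pvPhase2 corrections r1.2.2 r1.1 r1.2.1
    String.ofList (r2.1 ++ r2.2.2.flatMap (pvRule3 corrections))

-- ===== PRECONDITION & SPEC =====
def Spec_smart_character_replacement_py (text : String) (corrections : List (String × String)) (out : String) : Prop := out = smart_character_replacement_py_alt text corrections
instance (text : String) (corrections : List (String × String)) (out : String) : Decidable (Spec_smart_character_replacement_py text corrections out) := by unfold Spec_smart_character_replacement_py; infer_instance

-- ===== CLAIM (what is proved, stated in full; the proofs are below) =====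
def Claim_equal_smart_character_replacement_py : Prop := ∀ (text : String) (corrections : List (String × String)), Dom_smart_character_replacement_py text corrections → Spec_smart_character_replacement_py text corrections (smart_character_replacement_py text corrections)

-- ===== LEMMAS AND PROOFS =====

theorem pv_isdigit_of_isalpha (c : Char) :
    PySem.Chars.isalpha c = true → PySem.Chars.isdigit c = false := by
  unfold PySem.Chars.isalpha PySem.Chars.isdigit
  intro h
  simp_all [PySem.Chars.isupper, PySem.Chars.islower, Char.le_def,
    UInt32.le_iff_toNat_le]
  omega

theorem pv_alnum_dash : PySem.Chars.isalnum '-' = false := by decide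
theorem pv_alnum_dot : PySem.Chars.isalnum '.' = false := by decide

theorem pvCnt_append (a b : List Char) : pvCnt (a ++ b) = pvCnt a + pvCnt b := by
  simp [pvCnt, List.filter_append]

-- A's step when fewer than 2 alphanumerics are in the result
theorem pvAStep_lt (corrections : List (String × String)) (acc : List Char) (ch : Char)
    (h : pvCnt acc < 2) :
    pvAStep corrections acc ch
      = acc ++ (if ch = '-' ∨ ch = '.' then [ch] else pvRule1 corrections ch) := by
  by_cases hsp : ch = '-' ∨ ch = '.'
  · simp [pvAStep, hsp]
  · simp only [pvAStep, pvRule1, if_neg hsp]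
    by_cases ha : PySem.Chars.isalpha ch = true
    · rcases hl : pvLook corrections ch with _ | v <;>
        simp_all [pvCnt, pv_isdigit_of_isalpha ch ha]
    · have ha' : PySem.Chars.isalpha ch = false := by simpa using ha
      by_cases hd : PySem.Chars.isdigit ch = true <;> simp_all [pvCnt]

-- A's step when exactly 2 alphanumerics are in the result
theorem pvAStep_eq2 (corrections : List (String × String)) (acc : List Char) (ch : Char)
    (h : pvCnt acc = 2) :
    pvAStep corrections acc ch
      = acc ++ (if ch = '-' ∨ ch = '.' then [ch] else pvRule2 ch) := by
  by_cases hsp : ch = '-' ∨ ch = '.'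
  · simp [pvAStep, hsp]
  · simp only [pvAStep, pvRule2, if_neg hsp]
    by_cases hd : PySem.Chars.isdigit ch = true
    · rcases hdl : pvDigitToLetter ch with _ | l <;> simp_all [pvCnt]
    · by_cases ha : PySem.Chars.isalpha ch = true <;> simp_all [pvCnt]

-- A's step when more than 2 alphanumerics are in the result
theorem pvAStep_gt (corrections : List (String × String)) (acc : List Char) (ch : Char)
    (h : 2 < pvCnt acc) :
    pvAStep corrections acc ch = acc ++ pvRule3 corrections ch := by
  have hlt : ¬ (acc.filter (fun c => PySem.Chars.isalnum c)).length < 2 := by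
    simp only [pvCnt] at h; omega
  have hne : ¬ (acc.filter (fun c => PySem.Chars.isalnum c)).length = 2 := by
    simp only [pvCnt] at h; omega
  by_cases hsp : ch = '-' ∨ ch = '.'
  · simp [pvAStep, pvRule3, hsp]
  · simp only [pvAStep, pvRule3, if_neg hsp, if_neg hlt, if_neg hne]
    by_cases ha : PySem.Chars.isalpha ch = true
    · rcases hl : pvLook corrections ch with _ | v <;>
        simp_all [pv_isdigit_of_isalpha ch ha]
    · have ha' : PySem.Chars.isalpha ch = false := by simpa using ha
      by_cases hd : PySem.Chars.isdigit ch = true <;> simp_all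

-- phase 1 simulates A's fold and leaves a coherent state
theorem pvPhase1_spec (corrections : List (String × String)) (cs out : List Char) :
    (pvPhase1 corrections cs out (pvCnt out)).2.2.foldl (pvAStep corrections)
        (pvPhase1 corrections cs out (pvCnt out)).1
      = cs.foldl (pvAStep corrections) out
    ∧ (pvPhase1 corrections cs out (pvCnt out)).2.1
        = pvCnt (pvPhase1 corrections cs out (pvCnt out)).1
    ∧ ((pvPhase1 corrections cs out (pvCnt out)).2.2 = []
        ∨ 2 ≤ (pvPhase1 corrections cs out (pvCnt out)).2.1) := by
  induction cs generalizing out with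
  | nil => simp [pvPhase1]
  | cons ch rest ih =>
      by_cases h : pvCnt out < 2
      · by_cases hsp : ch = '-' ∨ ch = '.'
        · have hc : pvCnt (out ++ [ch]) = pvCnt out := by
            obtain h' | h' := hsp <;> subst h' <;> simp [pvCnt_append, pvCnt, pv_alnum_dash, pv_alnum_dot]
          have := ih (out ++ [ch])
          rw [hc] at this
          simpa [pvPhase1, h, hsp, pvAStep_lt corrections out ch h, hsp] using this
        · have hc : pvCnt (out ++ pvRule1 corrections ch)
              = pvCnt out + pvCnt (pvRule1 corrections ch) := pvCnt_append _ _
          have := ih (out ++ pvRule1 corrections ch)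
          rw [hc] at this
          simpa [pvPhase1, h, hsp, pvAStep_lt corrections out ch h] using this
      · simp [pvPhase1, h]; omega

-- phase 2 simulates A's fold; the count never decreases and the loop exits with count ≠ 2
theorem pvPhase2_spec (corrections : List (String × String)) (cs out : List Char) :
    (pvPhase2 corrections cs out (pvCnt out)).2.2.foldl (pvAStep corrections)
        (pvPhase2 corrections cs out (pvCnt out)).1
      = cs.foldl (pvAStep corrections) out
    ∧ (pvPhase2 corrections cs out (pvCnt out)).2.1
        = pvCnt (pvPhase2 corrections cs out (pvCnt out)).1
    ∧ pvCnt out ≤ (pvPhase2 corrections cs out (pvCnt out)).2.1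
    ∧ ((pvPhase2 corrections cs out (pvCnt out)).2.2 = []
        ∨ (pvPhase2 corrections cs out (pvCnt out)).2.1 ≠ 2) := by
  induction cs generalizing out with
  | nil => simp [pvPhase2]
  | cons ch rest ih =>
      by_cases h : pvCnt out = 2
      · by_cases hsp : ch = '-' ∨ ch = '.'
        · have hc : pvCnt (out ++ [ch]) = pvCnt out := by
            obtain h' | h' := hsp <;> subst h' <;> simp [pvCnt_append, pvCnt, pv_alnum_dash, pv_alnum_dot]
          have := ih (out ++ [ch])
          rw [hc] at this
          simpa [pvPhase2, h, hsp, pvAStep_eq2 corrections out ch h, hc] using this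
        · have hc : pvCnt (out ++ pvRule2 ch) = pvCnt out + pvCnt (pvRule2 ch) :=
            pvCnt_append _ _
          have := ih (out ++ pvRule2 ch)
          rw [hc] at this
          obtain ⟨h1, h2, h3, h4⟩ := this
          refine ⟨?_, ?_, ?_, ?_⟩ <;>
            simp only [pvPhase2, h, if_pos, if_neg hsp] <;>
            simp_all [pvAStep_eq2 corrections out ch h] <;> omega
      · simp [pvPhase2, h]

-- the tail fold with count already past 2 is a counterless flatMap
theorem pvPhase3_spec (corrections : List (String × String)) (cs out : List Char)
    (h : 2 < pvCnt out) :
    cs.foldl (pvAStep corrections) out = out ++ cs.flatMap (pvRule3 corrections) := by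
  induction cs generalizing out with
  | nil => simp
  | cons ch rest ih =>
      have h' : 2 < pvCnt (out ++ pvRule3 corrections ch) := by
        rw [pvCnt_append]; omega
      simp only [List.foldl_cons, pvAStep_gt corrections out ch h, ih _ h',
        List.flatMap_cons, List.append_assoc]

-- ===== VERDICT (by name: the statement is the Claim_ definition above) =====
theorem smart_character_replacement_py_spec : Claim_equal_smart_character_replacement_py := by
  intro text corrections _
  unfold Spec_smart_character_replacement_py smart_character_replacement_py
    smart_character_replacement_py_alt
  by_cases h : PySem.Str.len text < 3
  · rw [if_pos h, if_pos h]
  · simp only [if_neg h]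
    have h0 : pvCnt ([] : List Char) = 0 := rfl
    obtain ⟨e1, c1, x1⟩ := pvPhase1_spec corrections text.toList []
    rw [h0] at e1 c1 x1
    set r1 := pvPhase1 corrections text.toList [] 0 with hr1
    obtain ⟨e2, c2, m2, x2⟩ := pvPhase2_spec corrections r1.2.2 r1.1
    rw [← c1] at e2 c2 m2 x2
    set r2 := pvPhase2 corrections r1.2.2 r1.1 r1.2.1 with hr2
    by_cases hr : r2.2.2 = []
    · rw [← e1, ← e2, hr]
      simp
    · have hne2 : r2.2.1 ≠ 2 := x2.resolve_left hr
      have hrest1 : r1.2.2 ≠ [] := by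
        intro hh
        rw [hh] at hr2
        simp only [pvPhase2] at hr2
        rw [hr2] at hr
        exact hr rfl
      have hge : 2 ≤ r1.2.1 := x1.resolve_left hrest1
      have hgt : 2 < pvCnt r2.1 := by
        rw [← c2]
        rw [c1] at hge
        omega
      rw [← e1, ← e2, pvPhase3_spec corrections r2.2.2 r2.1 hgt]
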